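-- pv_equiv track=rewrite | github.com/RafaelJohn9/LeetHub | 2454-largest-local-values-in-a-matrix/largest-local-values-in-a-matrix.py | largestLocal
-- ===== SOURCE A (Python) =====
-- from typing import List
--
-- def largestLocal(grid: List[List[int]]) -> List[List[int]]:
--     maxLocal = []
--
--     for i in range(1, len(grid) - 1):
--         row_in_maxLocal = []
--         for j in range(1, len(grid[0]) - 1):
--             max_num = float('-inf')
--             for r in range(i - 1, i + 2):
--                 for c in range(j - 1, j + 2):
--                     max_num = max(max_num, grid[r][c])
--             row_in_maxLocal.append(max_num)
--         maxLocal.append(row_in_maxLocal)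
--     return maxLocal
-- ===== SOURCE B (Python) =====
-- from typing import List
--
-- def largestLocal(grid: List[List[int]]) -> List[List[int]]:
--     n = len(grid)
--     if n < 3:
--         return []
--     m = len(grid[0])
--     # horizontal pass: sliding max over 3 columns, per row
--     H = [[max(row[j - 1], row[j], row[j + 1]) for j in range(1, m - 1)]
--          for row in grid]
--     # vertical pass: sliding max over 3 rows of the intermediate
--     return [[max(H[i - 1][j], H[i][j], H[i + 1][j]) for j in range(m - 2)]
--             for i in range(1, n - 1)]
-- ===== Notes on version B (the rewrite author's own statement) =====
-- stated objective: faster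
-- what changed: Replaces the triple-nested 3x3 window scan (9 lookups per output cell) by separable max pooling: one horizontal 3-wide sliding-max pass building an intermediate table, then one vertical 3-wide sliding-max pass over it.
import Mathlib
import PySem

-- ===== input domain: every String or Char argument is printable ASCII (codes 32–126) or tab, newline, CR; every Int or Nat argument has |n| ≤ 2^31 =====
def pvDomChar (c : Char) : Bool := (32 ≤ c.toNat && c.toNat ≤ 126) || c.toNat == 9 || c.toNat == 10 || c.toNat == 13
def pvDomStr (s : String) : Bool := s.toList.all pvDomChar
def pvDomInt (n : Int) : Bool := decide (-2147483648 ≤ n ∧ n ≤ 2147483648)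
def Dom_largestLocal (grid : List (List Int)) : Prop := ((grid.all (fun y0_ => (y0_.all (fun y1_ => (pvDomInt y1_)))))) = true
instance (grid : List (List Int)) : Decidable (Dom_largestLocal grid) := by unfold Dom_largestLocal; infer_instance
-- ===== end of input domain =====

-- B computes the 3x3 max pooling separably (a horizontal 3-wide sliding max per row, then a
-- vertical 3-wide sliding max over that table) instead of A's triple-nested 3x3 window scan.

-- ===== PORT A =====
-- max_num = max(max_num, x) where max_num starts as float('-inf'): none models -inf
def pymaxO (m : Option Int) (x : Int) : Option Int :=
  some (match m with
        | none => x
        | some v => max v x)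

def largestLocal (grid : List (List Int)) : List (List Int) :=
  (PySem.List.pyRange 1 ((grid.length : Int) - 1) 1).foldl (fun maxLocal i =>
    maxLocal ++ [(PySem.List.pyRange 1 (((PySem.List.pyGetD grid 0 []).length : Int) - 1) 1).foldl
      (fun row_in_maxLocal j =>
        row_in_maxLocal ++ [((PySem.List.pyRange (i - 1) (i + 2) 1).foldl (fun max_num r =>
          (PySem.List.pyRange (j - 1) (j + 2) 1).foldl (fun max_num c =>
            pymaxO max_num (PySem.List.pyGetD (PySem.List.pyGetD grid r []) c 0)) max_num)
          none).getD 0]) []]) []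

-- ===== PORT B =====
-- max(row[j-1], row[j], row[j+1])
def hmax3 (row : List Int) (j : Int) : Int :=
  max (PySem.List.pyGetD row (j - 1) 0)
    (max (PySem.List.pyGetD row j 0) (PySem.List.pyGetD row (j + 1) 0))

def hRow (m : Int) (row : List Int) : List Int :=
  (PySem.List.pyRange 1 (m - 1) 1).map (fun j => hmax3 row j)

-- the intermediate table H of Source B: one horizontal sliding max per row
def hTable (grid : List (List Int)) : List (List Int) :=
  grid.map (hRow ((PySem.List.pyGetD grid 0 []).length : Int))

def largestLocal_alt (grid : List (List Int)) : List (List Int) :=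
  if grid.length < 3 then []
  else
    (PySem.List.pyRange 1 ((grid.length : Int) - 1) 1).map (fun i =>
      (PySem.List.pyRange 0 (((PySem.List.pyGetD grid 0 []).length : Int) - 2) 1).map (fun j =>
        max (PySem.List.pyGetD (PySem.List.pyGetD (hTable grid) (i - 1) []) j 0)
          (max (PySem.List.pyGetD (PySem.List.pyGetD (hTable grid) i []) j 0)
            (PySem.List.pyGetD (PySem.List.pyGetD (hTable grid) (i + 1) []) j 0))))

-- ===== PRECONDITION & SPEC =====
-- Pre_ excludes exactly the inputs on which A raises IndexError: grids with at least 3 rows and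
-- at least 3 columns in row 0 but some row shorter than row 0 (the 3x3 windows index past it).
def Pre_largestLocal (grid : List (List Int)) : Prop :=
  3 ≤ grid.length → 3 ≤ (PySem.List.pyGetD grid 0 []).length →
    ∀ row ∈ grid, (PySem.List.pyGetD grid 0 []).length ≤ row.length

instance (grid : List (List Int)) : Decidable (Pre_largestLocal grid) := by
  unfold Pre_largestLocal; infer_instance

def pvWitness_largestLocal : List (List Int) := [[1, 2, 3], [4, 5, 6], [7, 8, 9]]

def Spec_largestLocal (grid : List (List Int)) (out : List (List Int)) : Prop := out = largestLocal_alt grid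
instance (grid : List (List Int)) (out : List (List Int)) : Decidable (Spec_largestLocal grid out) := by unfold Spec_largestLocal; infer_instance

-- ===== CLAIM (what is proved, stated in full; the proofs are below) =====
def Claim_equal_largestLocal : Prop := ∀ (grid : List (List Int)), Dom_largestLocal grid → Pre_largestLocal grid → Spec_largestLocal grid (largestLocal grid)

-- ===== LEMMAS AND PROOFS =====

-- appending one element per iteration is List.map
theorem pvFoldlApp {α : Type} (f : Int → α) (xs : List Int) (init : List α) :
    xs.foldl (fun acc x => acc ++ [f x]) init = init ++ xs.map f := by
  induction xs generalizing init with
  | nil => simp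
  | cons x xs ih => simp [List.foldl, ih]

theorem pvRange3 (a : Int) :
    PySem.List.pyRange (a - 1) (a + 2) 1 = [a - 1, a, a + 1] := by
  rw [PySem.List.pyRange_one_cons (by omega), PySem.List.pyRange_one_cons (by omega),
      PySem.List.pyRange_one_cons (by omega), PySem.List.pyRange_one_eq_nil (by omega)]
  norm_num

theorem pymaxO_none (x : Int) : pymaxO none x = some x := rfl

theorem pymaxO_some (v x : Int) : pymaxO (some v) x = some (max v x) := rfl

theorem pvGetDMap {α β : Type} (f : α → β) (xs : List α) (r : Int) (d : α) (d' : β)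
    (h0 : 0 ≤ r) (h1 : r < (xs.length : Int)) :
    PySem.List.pyGetD (xs.map f) r d' = f (PySem.List.pyGetD xs r d) := by
  obtain ⟨n, rfl⟩ := Int.eq_ofNat_of_zero_le h0
  have hn : n < xs.length := by exact_mod_cast h1
  simp [PySem.List.pyGetD_natCast, List.getD_eq_getElem?_getD, List.getElem?_map,
    List.getElem?_eq_getElem hn]

theorem largestLocal_spec' (grid : List (List Int)) :
    largestLocal grid = largestLocal_alt grid := by
  by_cases hn : grid.length < 3
  · unfold largestLocal largestLocal_alt
    rw [if_pos hn,
      show PySem.List.pyRange 1 ((grid.length : Int) - 1) 1 = [] from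
        PySem.List.pyRange_one_eq_nil (by omega)]
    rfl
  · rw [not_lt] at hn
    unfold largestLocal largestLocal_alt hTable
    rw [if_neg (by omega)]
    simp only [pvFoldlApp, List.nil_append]
    apply List.map_congr_left
    intro i hi
    rw [PySem.List.mem_pyRange_one] at hi
    set M : Int := ((PySem.List.pyGetD grid 0 []).length : Int) with hM
    rw [PySem.List.pyRange_one 1 (M - 1), PySem.List.pyRange_one 0 (M - 2)]
    rw [show (M - 1) - 1 = M - 2 by ring, show (M - 2) - 0 = M - 2 by ring]
    simp only [List.map_map]
    apply List.map_congr_left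
    intro k hk
    rw [List.mem_range] at hk
    have hkM : (k : Int) < M - 2 := by omega
    simp only [Function.comp, zero_add]
    -- rows of the table: H[r] = hRow M grid[r]
    rw [pvGetDMap (hRow M) grid (i - 1) [] [] (by omega) (by omega),
        pvGetDMap (hRow M) grid i [] [] (by omega) (by omega),
        pvGetDMap (hRow M) grid (i + 1) [] [] (by omega) (by omega)]
    -- columns of the table rows
    unfold hRow
    rw [PySem.List.pyGetD_map_pyRange_one (hmax3 _) 1 (M - 1) k 0 (by omega),
        PySem.List.pyGetD_map_pyRange_one (hmax3 _) 1 (M - 1) k 0 (by omega),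
        PySem.List.pyGetD_map_pyRange_one (hmax3 _) 1 (M - 1) k 0 (by omega)]
    unfold hmax3
    -- A's 3x3 window
    rw [pvRange3 i, pvRange3 (1 + (k : Int))]
    simp only [List.foldl_cons, List.foldl_nil, pymaxO_none, pymaxO_some, Option.getD_some]
    simp only [max_assoc]

-- ===== VERDICT (by name: the statement is the Claim_ definition above) =====
theorem largestLocal_spec : Claim_equal_largestLocal := by
  intro grid _ _
  unfold Spec_largestLocal
  exact largestLocal_spec' grid
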